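-- pv_equiv track=rewrite | github.com/smital12/log_processor | log_processor.py | format_all_headers
-- ===== SOURCE A (Python) =====
-- def striplist(l):
--     return [x.strip() for x in l]
--
-- def format_header(oldHeader):
--     # convert header into tab-delimited header
--     newHeader = []
--     newLine = ""
--     siteNumLines = []
--     siteNumString = ""
--     isSiteNumLine = False
--
--     for i, line in enumerate(oldHeader):
--         # fine start of multi-line site number list, so we can squash to single
--         # line string
--         if line.startswith("Site Number"):
--             isSiteNumLine = True
--
--         if isSiteNumLine:
--             siteNumLines.append(line.replace(":", ""))
--         else:
--             # add key to date/time string, which is always second line of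
--             # header
--             if i == 1:
--                 newLine = "Time\t" + line
--             # convert delimiters and remove excess whitespace
--             else:
--                 newLine = "\t".join(striplist(line.split(":")))
--
--             newHeader.append(newLine)
--
--         # we've reached end of site number lines, join them as a single line
--         if isSiteNumLine and oldHeader[i+1].startswith("Device#"):
--             isSiteNumLine = False
--             # remove spaces from list of sites and join to label
--             siteNumString = ''.join(siteNumLines[1:])
--             siteNumString = siteNumString.replace(' ', '')
--             newHeader.append('Site Number\t' + siteNumString)
--
--     return newHeader
--
-- def format_all_headers(inLines, isHeaderEveryTime=False):
--     oldHeader = []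
--     lines = []
--     isHeaderLine = False
--
--     for line in inLines:
--
--         # find start of a header section
--         if not isHeaderLine and line.startswith("Datalog report"):
--             oldHeader.clear()
--             isHeaderLine = True
--
--         if isHeaderLine:
--             # store header lines for processing
--             # don't copy to output
--             oldHeader.append(line)
--         else:
--             # copy line as-is
--             lines.append(line)
--
--         # check if this is last line in header
--         if isHeaderLine and line.startswith("Device#:"):
--             isHeaderLine = False
--             # add the formatted header as list of strings to output
--             lines.extend(format_header(oldHeader))
--
--     return lines
-- ===== SOURCE B (Python) =====
-- def _reformat(i, line):
--     # i == 1 is the date/time line; otherwise tab-join the stripped ':' fields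
--     if i == 1:
--         return "Time\t" + line
--     return "\t".join(part.strip() for part in line.split(":"))
--
--
-- def _format_header(header):
--     # region-based reformat: walk the header by index; on a "Site Number" line,
--     # scan ahead for the end of the site block (the line before one starting
--     # with "Device#") and collapse it to a single entry.
--     out = []
--     sites = []
--     i, n = 0, len(header)
--     while i < n:
--         if header[i].startswith("Site Number"):
--             k = i
--             while not header[k + 1].startswith("Device#"):
--                 sites.append(header[k].replace(":", ""))
--                 k += 1
--             sites.append(header[k].replace(":", ""))
--             out.append("Site Number\t" + "".join(sites[1:]).replace(" ", ""))
--             i = k + 1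
--         else:
--             out.append(_reformat(i, header[i]))
--             i += 1
--     return out
--
--
-- def format_all_headers(inLines, isHeaderEveryTime=False):
--     out = []
--     i, n = 0, len(inLines)
--     while i < n:
--         if inLines[i].startswith("Datalog report"):
--             # header section: runs up to the next "Device#:" line
--             j = i
--             while j < n and not inLines[j].startswith("Device#:"):
--                 j += 1
--             if j == n:
--                 break  # unterminated header: its lines are not emitted
--             out.extend(_format_header(inLines[i:j + 1]))
--             i = j + 1
--         else:
--             out.append(inLines[i])
--             i += 1
--     return out
-- ===== Notes on version B (the rewrite author's own statement) =====
-- stated objective: alternative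
-- what changed: Replaces the flag-driven state machines (isHeaderLine / isSiteNumLine booleans threaded through single flat loops) with an index/scan decomposition: the main loop locates each header's terminating 'Device#:' line up front and slices the header out, and the header formatter handles the 'Site Number' block with a dedicated nested scan instead of a carried flag.
import Mathlib
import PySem

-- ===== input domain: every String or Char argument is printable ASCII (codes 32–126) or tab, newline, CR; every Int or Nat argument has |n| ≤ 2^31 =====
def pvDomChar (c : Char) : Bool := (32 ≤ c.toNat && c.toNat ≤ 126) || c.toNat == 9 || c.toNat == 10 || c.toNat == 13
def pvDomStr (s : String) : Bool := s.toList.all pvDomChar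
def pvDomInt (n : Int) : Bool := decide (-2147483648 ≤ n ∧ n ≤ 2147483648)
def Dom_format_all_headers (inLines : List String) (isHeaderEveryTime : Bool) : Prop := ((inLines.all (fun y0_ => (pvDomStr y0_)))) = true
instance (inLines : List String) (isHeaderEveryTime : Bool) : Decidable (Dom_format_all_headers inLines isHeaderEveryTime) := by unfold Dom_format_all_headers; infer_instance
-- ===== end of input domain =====

-- B reorganises A's flag-driven state machine into an index/scan decomposition (find the
-- header's terminator up front, then format it with a nested site-block scan); same outputs,
-- objective: alternative structure, not claimed faster.

-- ===== PORT A =====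
def stripList (l : List String) : List String := l.map (fun x => PySem.Str.strip x)

-- format_header's loop, recursing on the remaining lines; i is the enumerate index.
-- `oldHeader[i+1]` is read as the head of the remaining lines (same value); where i+1 is out
-- of range Python raises IndexError — unreachable from format_all_headers (every flushed
-- header ends with a "Device#:" line); we default to "" there.
def fmtHeaderGo (i : Int) (newHeader siteNumLines : List String) (isSiteNumLine : Bool) :
    List String → List String
  | [] => newHeader
  | line :: rest =>
    let isSite := if PySem.Str.startswith line "Site Number" then true else isSiteNumLine
    let st :=
      if isSite then (newHeader, siteNumLines ++ [PySem.Str.replace line ":" ""])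
      else if i = 1 then (newHeader ++ ["Time\t" ++ line], siteNumLines)
      else (newHeader ++ [PySem.Str.join "\t" (stripList ((PySem.Str.split? line ":").getD []))], siteNumLines)
    if isSite && PySem.Str.startswith (rest.headD "") "Device#" then
      -- siteNumLines[1:] is List.drop 1 (nonnegative slice)
      fmtHeaderGo (i+1) (st.1 ++ ["Site Number\t" ++ PySem.Str.replace (PySem.Str.join "" (st.2.drop 1)) " " ""]) st.2 false rest
    else
      fmtHeaderGo (i+1) st.1 st.2 isSite rest

def format_header (oldHeader : List String) : List String :=
  fmtHeaderGo 0 [] [] false oldHeader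

def fahGo (oldHeader lines : List String) (isHeaderLine : Bool) : List String → List String
  | [] => lines
  | line :: rest =>
    let isH := if !isHeaderLine && PySem.Str.startswith line "Datalog report" then true else isHeaderLine
    let oldH := if !isHeaderLine && PySem.Str.startswith line "Datalog report" then ([] : List String) else oldHeader
    let st := if isH then (oldH ++ [line], lines) else (oldH, lines ++ [line])
    if isH && PySem.Str.startswith line "Device#:" then
      fahGo st.1 (st.2 ++ format_header st.1) false rest
    else
      fahGo st.1 st.2 isH rest

def format_all_headers (inLines : List String) (isHeaderEveryTime : Bool) : List String :=
  fahGo [] [] false inLines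

-- ===== PORT B =====
def bReformat (i : Int) (line : String) : String :=
  if i = 1 then "Time\t" ++ line
  else PySem.Str.join "\t" (((PySem.Str.split? line ":").getD []).map (fun part => PySem.Str.strip part))

-- inner while of _format_header: consume the site block; returns (sites, new index, rest).
-- `header[k+1]` is the head of the rest; out of range raises in Python — unreachable from
-- format_all_headers (headers end with a "Device#:" line); defaulted to "".
def bSiteLoop (sites : List String) (i : Int) : List String → List String × Int × List String
  | [] => (sites, i, [])
  | l :: rest =>
    if PySem.Str.startswith (rest.headD "") "Device#" then
      (sites ++ [PySem.Str.replace l ":" ""], i + 1, rest)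
    else
      bSiteLoop (sites ++ [PySem.Str.replace l ":" ""]) (i + 1) rest

theorem bSiteLoop_len : ∀ (l : List String) (sites : List String) (i : Int),
    (bSiteLoop sites i l).2.2.length ≤ l.length := by
  intro l
  induction l with
  | nil => intro sites i; simp [bSiteLoop]
  | cons x rest ih =>
    intro sites i
    simp only [bSiteLoop]
    split
    · simp
    · exact le_trans (ih _ _) (by simp)

theorem bSiteLoop_len_cons (x : String) (rest sites : List String) (i : Int) :
    (bSiteLoop sites i (x :: rest)).2.2.length ≤ rest.length := by
  simp only [bSiteLoop]
  split
  · exact le_rfl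
  · exact bSiteLoop_len rest _ _

-- outer while of _format_header, recursing on the remaining header lines
def bFmtHeaderGo (i : Int) (out sites : List String) : List String → List String
  | [] => out
  | line :: rest =>
    if PySem.Str.startswith line "Site Number" then
      let r := bSiteLoop sites i (line :: rest)
      bFmtHeaderGo r.2.1 (out ++ ["Site Number\t" ++ PySem.Str.replace (PySem.Str.join "" (r.1.drop 1)) " " ""]) r.1 r.2.2
    else
      bFmtHeaderGo (i+1) (out ++ [bReformat i line]) sites rest
termination_by l => l.length
decreasing_by
  · simpa using Nat.lt_succ_of_le (bSiteLoop_len_cons line rest sites i)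
  · simp

def bFormatHeader (header : List String) : List String := bFmtHeaderGo 0 [] [] header

-- the j-scan of format_all_headers: split off the header (inLines[i:j+1]) at the first
-- "Device#:" line; none = no terminator (the while runs to n and we break)
def bFindHeader (acc : List String) : List String → Option (List String × List String)
  | [] => none
  | l :: rest =>
    if PySem.Str.startswith l "Device#:" then some (acc ++ [l], rest)
    else bFindHeader (acc ++ [l]) rest

theorem bFindHeader_len : ∀ (l : List String) (acc h r : List String),
    bFindHeader acc l = some (h, r) → r.length < l.length := by
  intro l
  induction l with
  | nil => intro acc h r hE; simp [bFindHeader] at hE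
  | cons x rest ih =>
    intro acc h r hE
    simp only [bFindHeader] at hE
    split at hE
    · cases hE; simp
    · exact Nat.lt_succ_of_lt (ih _ _ _ hE)

-- outer while of format_all_headers, recursing on the remaining input lines
def bGo : List String → List String
  | [] => []
  | line :: rest =>
    if PySem.Str.startswith line "Datalog report" then
      match hE : bFindHeader [] (line :: rest) with
      | none => []          -- unterminated header: break, its lines are dropped
      | some (h, r) => bFormatHeader h ++ bGo r
    else
      line :: bGo rest
termination_by l => l.length
decreasing_by
  · exact bFindHeader_len _ _ _ _ hE
  · simp

def format_all_headers_alt (inLines : List String) (isHeaderEveryTime : Bool) : List String :=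
  bGo inLines

-- ===== PRECONDITION & SPEC =====
def Spec_format_all_headers (inLines : List String) (isHeaderEveryTime : Bool) (out : List String) : Prop := out = format_all_headers_alt inLines isHeaderEveryTime
instance (inLines : List String) (isHeaderEveryTime : Bool) (out : List String) : Decidable (Spec_format_all_headers inLines isHeaderEveryTime out) := by unfold Spec_format_all_headers; infer_instance

-- ===== CLAIM (what is proved, stated in full; the proofs are below) =====
def Claim_equal_format_all_headers : Prop := ∀ (inLines : List String) (isHeaderEveryTime : Bool), Dom_format_all_headers inLines isHeaderEveryTime → Spec_format_all_headers inLines isHeaderEveryTime (format_all_headers inLines isHeaderEveryTime)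

-- ===== LEMMAS AND PROOFS =====
theorem sw_trans {s p q : String} (hpq : q.toList <+: p.toList)
    (h : PySem.Str.startswith s p = true) : PySem.Str.startswith s q = true := by
  rw [PySem.Str.startswith_eq] at h ⊢
  exact (PySem.Chars.startswith_iff _ _).mpr (hpq.trans ((PySem.Chars.startswith_iff _ _).mp h))

theorem sw_excl {s p q : String} (hq : q.toList.length ≤ p.toList.length)
    (hnpq : ¬ q.toList <+: p.toList)
    (h : PySem.Str.startswith s p = true) : PySem.Str.startswith s q = false := by
  by_contra hc
  rw [PySem.Str.startswith_eq] at h hc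
  have hq' : q.toList <+: s.toList :=
    (PySem.Chars.startswith_iff _ _).mp (by revert hc; cases PySem.Chars.startswith s.toList q.toList <;> simp)
  exact hnpq (List.prefix_of_prefix_length_le hq'
    ((PySem.Chars.startswith_iff _ _).mp h) hq)

theorem sw_dl_not_dev {s : String} (h : PySem.Str.startswith s "Datalog report" = true) :
    PySem.Str.startswith s "Device#:" = false :=
  sw_excl (by decide) (by decide) h

theorem sw_site_not_dev {s : String} (h : PySem.Str.startswith s "Site Number" = true) :
    PySem.Str.startswith s "Device#" = false :=
  sw_excl (by decide) (by decide) h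

theorem sw_devc_dev {s : String} (h : PySem.Str.startswith s "Device#:" = true) :
    PySem.Str.startswith s "Device#" = true :=
  sw_trans (by decide) h

-- a header whose remaining lines end in a "Device#"-line (or are empty)
def Ends (l : List String) : Prop :=
  l = [] ∨ PySem.Str.startswith (l.getLastD "") "Device#" = true

-- core: A's flag state machine over a header equals B's nested scans
theorem fmt_both : ∀ (n : Nat) (l : List String), l.length ≤ n →
    ((l ≠ [] → PySem.Str.startswith (l.headD "") "Device#" = false →
        PySem.Str.startswith (l.getLastD "") "Device#" = true →
      ∀ (i : Int) (out sites : List String),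
        fmtHeaderGo i out sites true l =
          bFmtHeaderGo (bSiteLoop sites i l).2.1
            (out ++ ["Site Number\t" ++ PySem.Str.replace (PySem.Str.join "" ((bSiteLoop sites i l).1.drop 1)) " " ""])
            (bSiteLoop sites i l).1 (bSiteLoop sites i l).2.2) ∧
     (Ends l → ∀ (i : Int) (out sites : List String),
        fmtHeaderGo i out sites false l = bFmtHeaderGo i out sites l)) := by
  intro n
  induction n with
  | zero =>
    intro l hl
    have hnil : l = [] := List.eq_nil_of_length_eq_zero (Nat.le_zero.mp hl)
    subst hnil
    exact ⟨fun h1 => absurd rfl h1, fun _ i out sites => by simp [fmtHeaderGo, bFmtHeaderGo]⟩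
  | succ n ih =>
    intro l hl
    match l with
    | [] => exact ⟨fun h1 => absurd rfl h1, fun _ i out sites => by simp [fmtHeaderGo, bFmtHeaderGo]⟩
    | x :: rest =>
      have hr : rest.length ≤ n := by simpa using hl
      have G2 : (x :: rest ≠ [] → PySem.Str.startswith ((x :: rest).headD "") "Device#" = false →
          PySem.Str.startswith ((x :: rest).getLastD "") "Device#" = true →
          ∀ (i : Int) (out sites : List String),
            fmtHeaderGo i out sites true (x :: rest) =
              bFmtHeaderGo (bSiteLoop sites i (x :: rest)).2.1
                (out ++ ["Site Number\t" ++ PySem.Str.replace (PySem.Str.join "" ((bSiteLoop sites i (x :: rest)).1.drop 1)) " " ""])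
                (bSiteLoop sites i (x :: rest)).1 (bSiteLoop sites i (x :: rest)).2.2) := by
        intro _ h2 h3 i out sites
        match rest with
        | [] =>
          simp at h2 h3
          rw [h3] at h2; cases h2
        | y :: tl =>
          have hlast : PySem.Str.startswith ((y :: tl).getLastD "") "Device#" = true := by
            have e : (x :: y :: tl).getLastD "" = (y :: tl).getLastD "" := by
              rw [List.getLastD_eq_getLast?, List.getLastD_eq_getLast?, List.getLast?_cons_cons]
            rw [e] at h3; exact h3
          by_cases hy : PySem.Str.startswith y "Device#" = true
          · have hy2 := hy; simp at hy2
            have e1 : fmtHeaderGo i out sites true (x :: y :: tl) =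
                fmtHeaderGo (i+1)
                  (out ++ ["Site Number\t" ++ PySem.Str.replace (PySem.Str.join "" ((sites ++ [PySem.Str.replace x ":" ""]).drop 1)) " " ""])
                  (sites ++ [PySem.Str.replace x ":" ""]) false (y :: tl) := by
              conv_lhs => rw [fmtHeaderGo]
              simp [hy2]
            have e2 : bSiteLoop sites i (x :: y :: tl) =
                (sites ++ [PySem.Str.replace x ":" ""], i + 1, y :: tl) := by
              conv_lhs => rw [bSiteLoop]
              simp [hy2]
            rw [e1, (ih (y :: tl) (by simpa using hr)).2 (Or.inr hlast), e2]
          · have hy' : PySem.Str.startswith y "Device#" = false := by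
              cases h : PySem.Str.startswith y "Device#" with
              | true => exact absurd h hy
              | false => rfl
            have hy2 := hy'; simp at hy2
            have e1 : fmtHeaderGo i out sites true (x :: y :: tl) =
                fmtHeaderGo (i+1) out (sites ++ [PySem.Str.replace x ":" ""]) true (y :: tl) := by
              conv_lhs => rw [fmtHeaderGo]
              simp [hy2]
            have e2 : bSiteLoop sites i (x :: y :: tl) =
                bSiteLoop (sites ++ [PySem.Str.replace x ":" ""]) (i + 1) (y :: tl) := by
              conv_lhs => rw [bSiteLoop]
              simp [hy2]
            rw [e1, (ih (y :: tl) (by simpa using hr)).1 (by simp)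
                 (by simpa using hy') hlast, e2]
      refine ⟨G2, ?_⟩
      intro hE i out sites
      by_cases hx : PySem.Str.startswith x "Site Number" = true
      · have h3 : PySem.Str.startswith ((x :: rest).getLastD "") "Device#" = true := by
          rcases hE with h | h
          · cases h
          · exact h
        have hx2 := hx; simp at hx2
        have e1 : fmtHeaderGo i out sites false (x :: rest) = fmtHeaderGo i out sites true (x :: rest) := by
          conv_lhs => rw [fmtHeaderGo]
          conv_rhs => rw [fmtHeaderGo]
          simp [hx2]
        have e2 : bFmtHeaderGo i out sites (x :: rest) =
            bFmtHeaderGo (bSiteLoop sites i (x :: rest)).2.1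
              (out ++ ["Site Number\t" ++ PySem.Str.replace (PySem.Str.join "" ((bSiteLoop sites i (x :: rest)).1.drop 1)) " " ""])
              (bSiteLoop sites i (x :: rest)).1 (bSiteLoop sites i (x :: rest)).2.2 := by
          conv_lhs => rw [bFmtHeaderGo]
          simp [hx2]
        rw [e1, G2 (by simp) (by simpa using sw_site_not_dev hx) h3, e2]
      · have hx' : PySem.Str.startswith x "Site Number" = false := by
          cases h : PySem.Str.startswith x "Site Number" with
          | true => exact absurd h hx
          | false => rfl
        have hx2 := hx'; simp at hx2
        have hEr : Ends rest := by
          cases rest with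
          | nil => exact Or.inl rfl
          | cons y tl =>
            rcases hE with h | h
            · cases h
            · refine Or.inr ?_
              have e : (x :: y :: tl).getLastD "" = (y :: tl).getLastD "" := by
                rw [List.getLastD_eq_getLast?, List.getLastD_eq_getLast?, List.getLast?_cons_cons]
              rw [e] at h; exact h
        have e1 : fmtHeaderGo i out sites false (x :: rest) =
            fmtHeaderGo (i+1) (out ++ [bReformat i x]) sites false rest := by
          conv_lhs => rw [fmtHeaderGo]
          by_cases hi : i = 1 <;> simp [hx2, bReformat, stripList, hi]
        have e2 : bFmtHeaderGo i out sites (x :: rest) =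
            bFmtHeaderGo (i+1) (out ++ [bReformat i x]) sites rest := by
          conv_lhs => rw [bFmtHeaderGo]
          simp [hx2]
        rw [e1, e2, (ih rest hr).2 hEr]

theorem flush_eq (h : List String) (x : String)
    (hx : PySem.Str.startswith x "Device#:" = true) :
    format_header (h ++ [x]) = bFormatHeader (h ++ [x]) := by
  unfold format_header bFormatHeader
  refine (fmt_both (h ++ [x]).length (h ++ [x]) le_rfl).2 (Or.inr ?_) 0 [] []
  have e : (h ++ [x]).getLastD "" = x := by
    rw [List.getLastD_eq_getLast?, List.getLast?_concat]; rfl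
  rw [e]
  exact sw_devc_dev hx

def bTail (acc : List String) (l : List String) : List String :=
  match bFindHeader acc l with
  | none => []
  | some (h, r) => bFormatHeader h ++ bGo r

theorem main_both : ∀ (n : Nat) (l : List String), l.length ≤ n →
    ((∀ oldH lines, fahGo oldH lines true l = lines ++ bTail oldH l) ∧
     (∀ oldH lines, fahGo oldH lines false l = lines ++ bGo l)) := by
  intro n
  induction n with
  | zero =>
    intro l hl
    have hnil : l = [] := List.eq_nil_of_length_eq_zero (Nat.le_zero.mp hl)
    subst hnil
    exact ⟨fun oldH lines => by simp [fahGo, bTail, bFindHeader],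
           fun oldH lines => by simp [fahGo, bGo]⟩
  | succ n ih =>
    intro l hl
    match l with
    | [] =>
      exact ⟨fun oldH lines => by simp [fahGo, bTail, bFindHeader],
             fun oldH lines => by simp [fahGo, bGo]⟩
    | x :: rest =>
      have hr : rest.length ≤ n := by simpa using hl
      constructor
      · intro oldH lines
        by_cases hx : PySem.Str.startswith x "Device#:" = true
        · have hx2 := hx; simp at hx2
          have e1 : fahGo oldH lines true (x :: rest) =
              fahGo (oldH ++ [x]) (lines ++ format_header (oldH ++ [x])) false rest := by
            conv_lhs => rw [fahGo]
            simp [hx2]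
          have e2 : bTail oldH (x :: rest) = bFormatHeader (oldH ++ [x]) ++ bGo rest := by
            unfold bTail
            conv_lhs => rw [bFindHeader]
            simp [hx2]
          rw [e1, (ih rest hr).2, e2, flush_eq _ _ hx, List.append_assoc]
        · have hx2 : PySem.Str.startswith x "Device#:" = false := by
            cases h : PySem.Str.startswith x "Device#:" with
            | true => exact absurd h hx
            | false => rfl
          have hx3 := hx2; simp at hx3
          have e1 : fahGo oldH lines true (x :: rest) = fahGo (oldH ++ [x]) lines true rest := by
            conv_lhs => rw [fahGo]
            simp [hx3]
          have e2 : bTail oldH (x :: rest) = bTail (oldH ++ [x]) rest := by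
            unfold bTail
            conv_lhs => rw [bFindHeader]
            simp [hx3]
          rw [e1, (ih rest hr).1, e2]
      · intro oldH lines
        by_cases hx : PySem.Str.startswith x "Datalog report" = true
        · have hnd : PySem.Str.startswith x "Device#:" = false := sw_dl_not_dev hx
          have hx2 := hx; simp at hx2
          have hnd2 := hnd; simp at hnd2
          have e1 : fahGo oldH lines false (x :: rest) = fahGo [x] lines true rest := by
            conv_lhs => rw [fahGo]
            simp [hx2, hnd2]
          have e2 : bGo (x :: rest) = bTail [x] rest := by
            conv_lhs => rw [bGo]
            unfold bTail
            have e3 : bFindHeader [] (x :: rest) = bFindHeader [x] rest := by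
              conv_lhs => rw [bFindHeader]
              simp [hnd2]
            rw [e3]
            rcases hF : bFindHeader [x] rest with _ | ⟨hh, rr⟩
            · simp [hx2]
            · simp [hx2]
          rw [e1, (ih rest hr).1, e2]
        · have hx2 : PySem.Str.startswith x "Datalog report" = false := by
            cases h : PySem.Str.startswith x "Datalog report" with
            | true => exact absurd h hx
            | false => rfl
          have hx3 := hx2; simp at hx3
          have e1 : fahGo oldH lines false (x :: rest) = fahGo oldH (lines ++ [x]) false rest := by
            conv_lhs => rw [fahGo]
            simp [hx3]
          have e2 : bGo (x :: rest) = x :: bGo rest := by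
            conv_lhs => rw [bGo]
            simp [hx3]
          rw [e1, (ih rest hr).2, e2]
          simp

-- ===== VERDICT (by name: the statement is the Claim_ definition above) =====
theorem format_all_headers_spec : Claim_equal_format_all_headers := by
  intro inLines isHeaderEveryTime _
  unfold Spec_format_all_headers format_all_headers format_all_headers_alt
  simpa using (main_both inLines.length inLines le_rfl).2 [] []
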